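-- pv_equiv track=rewrite | github.com/shoyimobloqulov/cp | algo/0371.py | ch
-- ===== SOURCE A (Python) =====
-- from math import isqrt
--
-- def pf(x):
--     f = {}
--     for i in range(2, isqrt(x) + 1):
--         if x % i == 0:
--             f[i] = 0
--             while x % i == 0:
--                 f[i] += 1
--                 x //= i
--     if x > 1:
--         f[x] = 1
--     return f
--
-- def cf(n, p):
--     c = 0
--     while n > 0:
--         c += n // p
--         n //= p
--     return c
--
-- def ch(n, a):
--     if a == 0:
--         return "NO"
--     if a == 1:
--         return "YES"
--
--     f = pf(a)
--     for p, e in f.items():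
--         if cf(n, p) < e:
--             return "NO"
--     return "YES"
-- ===== SOURCE B (Python) =====
-- def ch(n, a):
--     if a == 0:
--         return "NO"
--     if a == 1:
--         return "YES"
--     # inverse problem: find the least m with a | m!, then one comparison m <= n
--     m = 0
--     b = a
--     p = 2
--     while p * p <= b:
--         if b % p == 0:
--             e = 0
--             while b % p == 0:
--                 b //= p
--                 e += 1
--             m = max(m, _least_factorial(p, e))
--         p += 1
--     if b > 1:
--         m = max(m, b)
--     return "YES" if m <= n else "NO"
--
-- def _least_factorial(p, e):
--     # least x with at least e factors p in x!: walk the multiples of p,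
--     # accumulating how many factors p each one contributes
--     c = 0
--     x = 0
--     while c < e:
--         x += p
--         t = x
--         while t % p == 0:
--             c += 1
--             t //= p
--     return x
-- ===== Notes on version B (the rewrite author's own statement) =====
-- stated objective: alternative
-- what changed: B inverts the problem: instead of comparing each prime exponent of a with Legendre's count of n! (dict of factors + per-prime quotient sums at n), it computes the least m with a | m! - walking the multiples of each prime factor and accumulating the factors they contribute - and answers with the single comparison m <= n.
import Mathlib
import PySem

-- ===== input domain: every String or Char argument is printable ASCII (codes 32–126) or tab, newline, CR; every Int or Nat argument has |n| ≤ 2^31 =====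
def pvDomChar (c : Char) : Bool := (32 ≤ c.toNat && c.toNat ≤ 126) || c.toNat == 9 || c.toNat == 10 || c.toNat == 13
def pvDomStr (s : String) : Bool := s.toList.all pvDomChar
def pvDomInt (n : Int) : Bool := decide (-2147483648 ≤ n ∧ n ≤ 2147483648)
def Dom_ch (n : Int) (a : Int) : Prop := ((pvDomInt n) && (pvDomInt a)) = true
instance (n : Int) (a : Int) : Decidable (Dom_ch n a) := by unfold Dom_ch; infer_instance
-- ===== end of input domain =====

-- B inverts the problem: it computes the least m with a | m! (per prime factor of a, by walking
-- the multiples of p and accumulating the factors of p they contribute) and answers with the one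
-- comparison m ≤ n; no count of n!'s prime content is ever taken. Equivalence of the return
-- values is proved for a ≥ 0 (A raises ValueError from isqrt on negative a).

-- ===== PORT A =====
-- inner 'while x % i == 0: f[i] += 1; x //= i' of pf, with the count as accumulator
-- (the '2 ≤ i ∧ 0 < x' guard only makes the recursion total; it holds at every reachable call)
def pyStrip (i : Int) (x : Int) (e : Int) : Int × Int :=
  if h : 2 ≤ i ∧ 0 < x ∧ PySem.Int.mod x i = 0 then
    pyStrip i (PySem.Int.floordiv x i) (e + 1)
  else (e, x)
  termination_by x.toNat
  decreasing_by
    rcases h with ⟨hi, hx, -⟩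
    rw [PySem.Int.floordiv_eq_ediv_of_pos (by omega)]
    have hq : 0 ≤ x / i := Int.ediv_nonneg (by omega) (by omega)
    have hr := Int.emod_add_ediv x i
    have hrnn : 0 ≤ x % i := Int.emod_nonneg x (by omega)
    have h2q : 2 * (x / i) ≤ i * (x / i) := mul_le_mul_of_nonneg_right (by omega) hq
    omega

-- one iteration of pf's 'for i in range(2, isqrt(x) + 1)' body on the state (f, x)
def pfStep (st : PySem.Dict Int Int × Int) (i : Int) : PySem.Dict Int Int × Int :=
  if PySem.Int.mod st.2 i = 0 then
    let r := pyStrip i st.2 0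
    (st.1.insert i r.1, r.2)
  else st

-- pf: trial division up to isqrt(x); Python's isqrt raises on x < 0 (excluded by Pre_ch)
def pf (x : Int) : PySem.Dict Int Int :=
  let st := (PySem.List.pyRange 2 ((Nat.sqrt x.toNat : Int) + 1) 1).foldl pfStep
    (PySem.Dict.empty, x)
  if 1 < st.2 then st.1.insert st.2 1 else st.1

-- cf: 'c = 0; while n > 0: c += n // p; n //= p' (2 ≤ p is a totality guard; p is a prime here)
def cfLoop (n : Int) (p : Int) (c : Int) : Int :=
  if h : 0 < n ∧ 2 ≤ p then cfLoop (PySem.Int.floordiv n p) p (c + PySem.Int.floordiv n p) else c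
  termination_by n.toNat
  decreasing_by
    rcases h with ⟨hn, hp⟩
    rw [PySem.Int.floordiv_eq_ediv_of_pos (by omega)]
    have hq : 0 ≤ n / p := Int.ediv_nonneg (by omega) (by omega)
    have hr := Int.emod_add_ediv n p
    have hrnn : 0 ≤ n % p := Int.emod_nonneg n (by omega)
    have h2q : 2 * (n / p) ≤ p * (n / p) := mul_le_mul_of_nonneg_right (by omega) hq
    omega

def cf (n : Int) (p : Int) : Int := cfLoop n p 0

-- 'for p, e in f.items(): if cf(n, p) < e: return "NO"'
def chLoop (n : Int) : List (Int × Int) → String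
  | [] => "YES"
  | (p, e) :: rest => if cf n p < e then "NO" else chLoop n rest

def ch (n : Int) (a : Int) : String :=
  if a = 0 then "NO"
  else if a = 1 then "YES"
  else chLoop n (pf a).items

-- ===== PORT B =====
-- inner 'while t % p == 0: c += 1; t //= p' of _least_factorial
-- (the '2 ≤ p ∧ 0 < t' guard only makes the recursion total)
def bCount (p : Int) (t : Int) (c : Int) : Int :=
  if h : 2 ≤ p ∧ 0 < t ∧ PySem.Int.mod t p = 0 then
    bCount p (PySem.Int.floordiv t p) (c + 1)
  else c
  termination_by t.toNat
  decreasing_by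
    rcases h with ⟨hp, ht, -⟩
    rw [PySem.Int.floordiv_eq_ediv_of_pos (by omega)]
    have hq : 0 ≤ t / p := Int.ediv_nonneg (by omega) (by omega)
    have hr := Int.emod_add_ediv t p
    have hrnn : 0 ≤ t % p := Int.emod_nonneg t (by omega)
    have h2q : 2 * (t / p) ≤ p * (t / p) := mul_le_mul_of_nonneg_right (by omega) hq
    omega

-- 'while c < e: x += p; t = x; while …' of _least_factorial
-- (the extra guard conjuncts only make the recursion total; they hold at every reachable
-- call: x walks 0, p, 2p, … and the inner count strictly grows on a multiple of p)
def bReach (p : Int) (c : Int) (x : Int) (e : Int) : Int :=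
  if h : c < e ∧ 2 ≤ p ∧ 0 ≤ x ∧ p ∣ x ∧ c < bCount p (x + p) c then
    bReach p (bCount p (x + p) c) (x + p) e
  else x
  termination_by (e - c).toNat
  decreasing_by
    omega

-- the main loop of B's ch: trial division on b, accumulating m = max of the per-prime
-- thresholds (the extra guard conjuncts only make the recursion total; they follow from
-- 2 ≤ d ∧ d * d ≤ b at every reachable call)
def chAltLoop (n : Int) (b : Int) (d : Int) (m : Int) : String :=
  if h : 2 ≤ d ∧ d * d ≤ b ∧ d ≤ b ∧ (pyStrip d b 0).2 ≤ b then
    if PySem.Int.mod b d = 0 then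
      chAltLoop n (pyStrip d b 0).2 (d + 1) (max m (bReach d 0 0 (pyStrip d b 0).1))
    else chAltLoop n b (d + 1) m
  else
    if 1 < b then (if max m b ≤ n then "YES" else "NO")
    else (if m ≤ n then "YES" else "NO")
  termination_by (b + 1 - d).toNat
  decreasing_by
    · omega
    · omega

def ch_alt (n : Int) (a : Int) : String :=
  if a = 0 then "NO"
  else if a = 1 then "YES"
  else chAltLoop n a 2 0

-- ===== PRECONDITION & SPEC =====
-- Pre_ excludes a < 0, where A raises ValueError (math.isqrt of a negative argument).
def Pre_ch (n : Int) (a : Int) : Prop := 0 ≤ a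
instance (n : Int) (a : Int) : Decidable (Pre_ch n a) := by unfold Pre_ch; infer_instance
def pvWitness_ch : Int × Int := (6, 4)

def Spec_ch (n : Int) (a : Int) (out : String) : Prop := out = ch_alt n a
instance (n : Int) (a : Int) (out : String) : Decidable (Spec_ch n a out) := by unfold Spec_ch; infer_instance

-- ===== CLAIM (what is proved, stated in full; the proofs are below) =====
def Claim_equal_ch : Prop := ∀ (n : Int) (a : Int), Dom_ch n a → Pre_ch n a → Spec_ch n a (ch n a)

-- ===== LEMMAS AND PROOFS =====

-- ---- A side: ch n a = if a ∣ n! then "YES" else "NO" (for 2 ≤ a) ----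

lemma pyStrip_spec (i : Int) (hi : 2 ≤ i) : ∀ (x : Int), 0 < x → ∀ (e : Int),
    ∃ (m : Nat) (y : Int), pyStrip i x e = (e + (m : Int), y) ∧ x = i ^ m * y ∧ 0 < y ∧
      ¬ i ∣ y ∧ (i ∣ x → 1 ≤ m) := by
  suffices H : ∀ (X : Nat) (x : Int), x.toNat = X → 0 < x → ∀ (e : Int),
      ∃ (m : Nat) (y : Int), pyStrip i x e = (e + (m : Int), y) ∧ x = i ^ m * y ∧ 0 < y ∧
        ¬ i ∣ y ∧ (i ∣ x → 1 ≤ m) by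
    intro x hx e; exact H x.toNat x rfl hx e
  intro X
  induction X using Nat.strong_induction_on with
  | _ X IH =>
    intro x hX hx e
    rw [pyStrip]
    by_cases hcond : 2 ≤ i ∧ 0 < x ∧ PySem.Int.mod x i = 0
    · rw [dif_pos hcond]
      have hdvd : i ∣ x := (PySem.Int.mod_eq_zero_iff_dvd x i).mp hcond.2.2
      have hfd : PySem.Int.floordiv x i = x / i := PySem.Int.floordiv_eq_ediv_of_pos (by omega)
      have hxi : i * (x / i) = x := Int.mul_ediv_cancel' hdvd
      have hq0 : 0 ≤ x / i := Int.ediv_nonneg (by omega) (by omega)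
      have hqpos : 0 < x / i := by
        rcases eq_or_lt_of_le hq0 with h | h
        · exfalso; rw [← hxi, ← h, mul_zero] at hx; exact lt_irrefl 0 hx
        · exact h
      have hlt : (x / i).toNat < X := by
        have h2q : 2 * (x / i) ≤ i * (x / i) := mul_le_mul_of_nonneg_right (by omega) hq0
        omega
      obtain ⟨m, y, h1, h2, h3, h4, h5⟩ := IH (x / i).toNat hlt (x / i) rfl hqpos (e + 1)
      refine ⟨m + 1, y, ?_, ?_, h3, h4, fun _ => by omega⟩
      · rw [hfd, h1]
        have : e + 1 + (m : Int) = e + ((m + 1 : Nat) : Int) := by push_cast; ring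
        rw [this]
      · rw [pow_succ, mul_comm (i ^ m) i, mul_assoc, ← h2, hxi]
    · rw [dif_neg hcond]
      have hmod : PySem.Int.mod x i ≠ 0 := by
        intro h; exact hcond ⟨hi, hx, h⟩
      have hndvd : ¬ i ∣ x := fun h => hmod ((PySem.Int.mod_eq_zero_iff_dvd x i).mpr h)
      exact ⟨0, x, by simp, by simp, hx, hndvd, fun h => absurd h hndvd⟩


-- the product of p^e over a list of dict items
def prodPow (L : List (Int × Int)) : Int := (L.map (fun pe => pe.1 ^ pe.2.toNat)).prod

lemma pf_fold (b : Int) : ∀ (k : Nat) (j : Int) (f : PySem.Dict Int Int) (x : Int),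
    k = (b - j).toNat → 2 ≤ j → 0 < x →
    (∀ d : Int, 2 ≤ d → d < j → ¬ d ∣ x) →
    (∀ pe ∈ f.items, pe.1 < j) →
    (let st := (PySem.List.pyRange j b 1).foldl pfStep (f, x)
     ∃ L, st.1.items = f.items ++ L ∧ 0 < st.2 ∧
       (∀ d : Int, 2 ≤ d → d < b → ¬ d ∣ st.2) ∧
       L.Pairwise (fun u v => u.1 < v.1) ∧
       (∀ pe ∈ L, Nat.Prime pe.1.toNat ∧ j ≤ pe.1 ∧ pe.1 < b ∧ 1 ≤ pe.2) ∧
       prodPow L * st.2 = x) := by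
  intro k
  induction k with
  | zero =>
    intro j f x hk h2j hx hdiv hkeys
    rw [PySem.List.pyRange_one_eq_nil (by omega)]
    exact ⟨[], by simp, hx, fun d h2d hdb => hdiv d h2d (by omega), List.Pairwise.nil,
      by simp, one_mul x⟩
  | succ k ihk =>
    intro j f x hk h2j hx hdiv hkeys
    have hjb : j < b := by omega
    rw [PySem.List.pyRange_one_cons hjb, List.foldl_cons]
    simp only [pfStep]
    by_cases hmod : PySem.Int.mod x j = 0
    · -- j divides x, and (no smaller divisor) j is prime
      have hjx : j ∣ x := (PySem.Int.mod_eq_zero_iff_dvd x j).mp hmod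
      have hjcast : ((j.toNat : Nat) : Int) = j := by omega
      have hpj : Nat.Prime j.toNat := by
        rw [Nat.prime_def_lt]
        refine ⟨by omega, fun m hm hmd => ?_⟩
        by_contra hm1
        have hm0 : m ≠ 0 := by
          rintro rfl
          rw [Nat.zero_dvd] at hmd
          omega
        have hmj : (m : Int) ∣ j := by
          rw [← hjcast]
          exact_mod_cast hmd
        exact hdiv m (by omega) (by omega) (hmj.trans hjx)
      obtain ⟨m, y, hst, hxy, hy, hjy, hm1⟩ := pyStrip_spec j (by omega) x hx 0
      have hm1' : 1 ≤ m := hm1 hjx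
      have hfresh : f.contains j = false := by
        rw [PySem.Dict.contains_eq_decide_mem_keys]
        simp only [decide_eq_false_iff_not]
        intro hjk
        obtain ⟨pe, hpe, rfl⟩ := List.mem_map.mp hjk
        exact absurd (hkeys pe hpe) (by omega)
      have hitems : (f.insert j (0 + (m : Int))).items = f.items ++ [(j, 0 + (m : Int))] :=
        PySem.Dict.items_insert_of_not_contains f _ hfresh
      simp only [if_pos hmod, hst]
      obtain ⟨L', hL'items, hy', hdiv', hpair', hmem', hprod'⟩ :=
        ihk (j + 1) (f.insert j (0 + (m : Int))) y (by omega) (by omega) hy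
          (by
            intro d h2d hdj hddvd
            rcases lt_or_eq_of_le (by omega : d + 1 ≤ j + 1) with h | h
            · exact hdiv d h2d (by omega) (hddvd.trans ⟨j ^ m, by rw [hxy]; ring⟩)
            · have : d = j := by omega
              subst this
              exact hjy hddvd)
          (by
            intro pe hpe
            rw [hitems] at hpe
            rcases List.mem_append.mp hpe with h | h
            · have := hkeys pe h; omega
            · rw [List.mem_singleton] at h
              rw [h]
              show j < j + 1
              omega)
      refine ⟨(j, 0 + (m : Int)) :: L', ?_, hy', hdiv', ?_, ?_, ?_⟩
      · rw [hL'items, hitems, List.append_assoc, List.singleton_append]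
      · rw [List.pairwise_cons]
        exact ⟨fun v hv => by have := (hmem' v hv).2.1; omega, hpair'⟩
      · intro pe hpe
        rcases List.mem_cons.mp hpe with h | h
        · subst h
          exact ⟨hpj, le_refl _, hjb, by omega⟩
        · obtain ⟨h1, h2, h3, h4⟩ := hmem' pe h
          exact ⟨h1, by omega, h3, h4⟩
      · have hmt : (0 + (m : Int)).toNat = m := by omega
        rw [prodPow, List.map_cons, List.prod_cons, ← prodPow, hmt, mul_assoc, hprod', ← hxy]
    · simp only [if_neg hmod]
      have hjx : ¬ j ∣ x := fun h => hmod ((PySem.Int.mod_eq_zero_iff_dvd x j).mpr h)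
      obtain ⟨L', hL'items, hy', hdiv', hpair', hmem', hprod'⟩ :=
        ihk (j + 1) f x (by omega) (by omega) hx
          (by
            intro d h2d hdj hddvd
            rcases lt_or_eq_of_le (by omega : d + 1 ≤ j + 1) with h | h
            · exact hdiv d h2d (by omega) hddvd
            · have : d = j := by omega
              subst this
              exact hjx hddvd)
          (fun pe hpe => by have := hkeys pe hpe; omega)
      refine ⟨L', hL'items, hy', hdiv', hpair', ?_, hprod'⟩
      intro pe hpe
      obtain ⟨h1, h2, h3, h4⟩ := hmem' pe hpe
      exact ⟨h1, by omega, h3, h4⟩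

lemma pf_spec (a : Int) (ha : 2 ≤ a) :
    ∃ L, (pf a).items = L ∧ L.Pairwise (fun u v => u.1 < v.1) ∧
      (∀ pe ∈ L, Nat.Prime pe.1.toNat ∧ 2 ≤ pe.1 ∧ 1 ≤ pe.2) ∧ prodPow L = a := by
  have hsq : 0 < Nat.sqrt a.toNat := Nat.sqrt_pos.mpr (by omega)
  obtain ⟨L, hitems, hx2, hdiv, hpair, hmem, hprod⟩ :=
    pf_fold ((Nat.sqrt a.toNat : Int) + 1) (((Nat.sqrt a.toNat : Int) + 1 - 2).toNat) 2
      PySem.Dict.empty a rfl (by omega) (by omega)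
      (fun d h2d hd2 => absurd h2d (by omega))
      (by intro pe hpe; cases hpe)
  rw [show (PySem.Dict.empty : PySem.Dict Int Int).items = [] from rfl, List.nil_append] at hitems
  unfold pf
  dsimp only
  generalize hT : List.foldl pfStep (PySem.Dict.empty, a)
      (PySem.List.pyRange 2 ((Nat.sqrt a.toNat : Int) + 1) 1) = T at hitems hx2 hdiv hprod ⊢
  obtain ⟨f1, x1⟩ := T
  simp only at hitems hx2 hdiv hprod ⊢
  by_cases hst : 1 < x1
  · rw [if_pos hst]
    have hx1a : x1 ∣ a := ⟨prodPow L, by rw [← hprod]; ring⟩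
    have hpos : 0 < prodPow L := by
      by_contra h
      have h' : prodPow L ≤ 0 := by omega
      have : prodPow L * x1 ≤ 0 := mul_nonpos_of_nonpos_of_nonneg h' (by omega)
      omega
    have hx1le : x1 ≤ a := Int.le_of_dvd (by omega) hx1a
    have hxprime : Nat.Prime x1.toNat := by
      by_contra hnp
      have hne1 : x1.toNat ≠ 1 := by omega
      have hq := Nat.minFac_prime hne1
      have hqd : Nat.minFac x1.toNat ∣ x1.toNat := Nat.minFac_dvd _
      have hq2 : Nat.minFac x1.toNat ^ 2 ≤ x1.toNat := Nat.minFac_sq_le_self (by omega) hnp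
      have hqs : Nat.minFac x1.toNat ≤ Nat.sqrt a.toNat := by
        rw [Nat.le_sqrt']
        calc Nat.minFac x1.toNat ^ 2 ≤ x1.toNat := hq2
          _ ≤ a.toNat := by omega
      have hqcast : ((Nat.minFac x1.toNat : Nat) : Int) ≤ (Nat.sqrt a.toNat : Int) := by
        exact_mod_cast hqs
      have h2q : (2 : Int) ≤ ((Nat.minFac x1.toNat : Nat) : Int) := by
        exact_mod_cast hq.two_le
      apply hdiv ((Nat.minFac x1.toNat : Nat) : Int) h2q (by omega)
      have hdv : ((Nat.minFac x1.toNat : Nat) : Int) ∣ ((x1.toNat : Nat) : Int) :=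
        Int.natCast_dvd_natCast.mpr hqd
      rwa [show ((x1.toNat : Nat) : Int) = x1 by omega] at hdv
    have hxb : (Nat.sqrt a.toNat : Int) + 1 ≤ x1 := by
      by_contra h
      exact hdiv x1 (by omega) (by omega) (dvd_refl x1)
    have hfresh : f1.contains x1 = false := by
      rw [PySem.Dict.contains_eq_decide_mem_keys]
      simp only [decide_eq_false_iff_not]
      intro hk
      rw [show f1.keys = f1.items.map Prod.fst from rfl, hitems] at hk
      obtain ⟨pe, hpe, rfl⟩ := List.mem_map.mp hk
      have := (hmem pe hpe).2.2.1
      omega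
    rw [PySem.Dict.items_insert_of_not_contains f1 1 hfresh, hitems]
    refine ⟨L ++ [(x1, 1)], rfl, ?_, ?_, ?_⟩
    · rw [List.pairwise_append]
      refine ⟨hpair, List.pairwise_singleton _ _, ?_⟩
      intro u hu v hv
      rw [List.mem_singleton] at hv
      rw [hv]
      have := (hmem u hu).2.2.1
      show u.1 < x1
      omega
    · intro pe hpe
      rcases List.mem_append.mp hpe with h | h
      · obtain ⟨h1, h2, _, h4⟩ := hmem pe h
        exact ⟨h1, h2, h4⟩
      · rw [List.mem_singleton] at h
        rw [h]
        exact ⟨hxprime, by omega, by omega⟩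
    · rw [prodPow, List.map_append, List.prod_append, ← prodPow]
      simpa using hprod
  · rw [if_neg hst]
    refine ⟨L, hitems, hpair, ?_, ?_⟩
    · intro pe hpe
      obtain ⟨h1, h2, _, h4⟩ := hmem pe hpe
      exact ⟨h1, h2, h4⟩
    · have hx1 : x1 = 1 := by omega
      rw [← hprod, hx1, mul_one]

-- Legendre: cf n p computes the multiplicity of the prime p in n!
lemma legendre_step (N P : Nat) (hp : P.Prime) :
    (Nat.factorial N).factorization P = N / P + (Nat.factorial (N / P)).factorization P := by
  have hb1 : Nat.log P N < N + 2 := by have := Nat.log_le_self P N; omega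
  have hb2 : Nat.log P (N / P) < N + 1 := by
    have h1 := Nat.log_le_self P (N / P)
    have h2 := Nat.div_le_self N P
    omega
  rw [Nat.factorization_factorial hp hb1, Nat.factorization_factorial hp hb2,
    Finset.sum_eq_sum_Ico_succ_bot (by omega) (fun i => N / P ^ i), pow_one]
  congr 1
  rw [Finset.sum_Ico_eq_sum_range, Finset.sum_Ico_eq_sum_range]
  apply Finset.sum_congr rfl
  intro i _
  rw [Nat.div_div_eq_div_mul, ← pow_succ']
  congr 2
  omega

lemma cfLoop_eq (p : Int) (hp : Nat.Prime p.toNat) (h2 : 2 ≤ p) : ∀ (X : Nat) (n : Int),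
    n.toNat = X → ∀ (c : Int),
    cfLoop n p c = c + (((Nat.factorial n.toNat).factorization p.toNat : Nat) : Int) := by
  intro X
  induction X using Nat.strong_induction_on with
  | _ X IH =>
    intro n hX c
    rw [cfLoop]
    by_cases hn : 0 < n
    · rw [dif_pos ⟨hn, h2⟩]
      have hfd : PySem.Int.floordiv n p = n / p := PySem.Int.floordiv_eq_ediv_of_pos (by omega)
      have hq0 : 0 ≤ n / p := Int.ediv_nonneg (by omega) (by omega)
      have hlt : (n / p).toNat < X := by
        have hr := Int.emod_add_ediv n p
        have hrnn : 0 ≤ n % p := Int.emod_nonneg n (by omega)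
        have h2q : 2 * (n / p) ≤ p * (n / p) := mul_le_mul_of_nonneg_right (by omega) hq0
        omega
      have hcast : (n / p).toNat = n.toNat / p.toNat := by
        have hn' : n = ((n.toNat : Nat) : Int) := by omega
        have hp' : p = ((p.toNat : Nat) : Int) := by omega
        rw [hn', hp', ← Int.natCast_div]
        exact Int.toNat_natCast _
      rw [hfd, IH (n / p).toNat hlt (n / p) rfl (c + n / p), hcast,
        legendre_step n.toNat p.toNat hp]
      have : n / p = ((n.toNat / p.toNat : Nat) : Int) := by
        rw [← hcast]; omega
      rw [this]
      push_cast
      ring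
    · rw [dif_neg (by tauto)]
      have : n.toNat = 0 := by omega
      rw [this]
      simp [Nat.factorial]

lemma cf_eq (p : Int) (hp : Nat.Prime p.toNat) (h2 : 2 ≤ p) : ∀ (n : Int),
    cf n p = (((Nat.factorial n.toNat).factorization p.toNat : Nat) : Int) := by
  intro n
  have := cfLoop_eq p hp h2 n.toNat n rfl 0
  rw [cf, this, zero_add]

lemma chLoop_eq (n : Int) : ∀ (L : List (Int × Int)),
    chLoop n L = if ∀ pe ∈ L, pe.2 ≤ cf n pe.1 then "YES" else "NO" := by
  intro L
  induction L with
  | nil => simp [chLoop]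
  | cons pe rest ih =>
    obtain ⟨p, e⟩ := pe
    show (if cf n p < e then "NO" else chLoop n rest) = _
    by_cases h : cf n p < e
    · rw [if_pos h, if_neg]
      intro hall
      have := hall (p, e) (List.mem_cons_self)
      simp at this
      omega
    · rw [if_neg h, ih]
      have he : e ≤ cf n p := by omega
      have hiff : (∀ pe ∈ rest, pe.2 ≤ cf n pe.1) ↔
          (∀ pe ∈ (p, e) :: rest, pe.2 ≤ cf n pe.1) := by
        rw [List.forall_mem_cons]
        exact ⟨fun hr => ⟨he, hr⟩, fun hr => hr.2⟩
      exact if_congr hiff rfl rfl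

-- k coprime to every member is coprime to the product
lemma coprime_list_prod (k : Nat) : ∀ (l : List Nat), (∀ x ∈ l, Nat.Coprime k x) →
    Nat.Coprime k l.prod := by
  intro l h
  exact Nat.coprime_list_prod_right_iff.mpr h

-- distinct prime powers all divide F iff their product does (Nat version)
lemma nat_pp_dvd (F : Nat) : ∀ (M : List (Nat × Nat)),
    M.Pairwise (fun u v => u.1 < v.1) → (∀ q ∈ M, q.1.Prime) →
    ((M.map (fun q => q.1 ^ q.2)).prod ∣ F ↔ ∀ q ∈ M, q.1 ^ q.2 ∣ F) := by
  intro M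
  induction M with
  | nil => simp
  | cons q M ih =>
    intro hpair hprime
    rw [List.pairwise_cons] at hpair
    rw [List.map_cons, List.prod_cons, List.forall_mem_cons]
    have hcop : Nat.Coprime (q.1 ^ q.2) ((M.map (fun q => q.1 ^ q.2)).prod) := by
      apply Nat.Coprime.pow_left
      apply coprime_list_prod
      intro x hx
      obtain ⟨v, hv, rfl⟩ := List.mem_map.mp hx
      apply Nat.Coprime.pow_right
      exact (Nat.coprime_primes (hprime q List.mem_cons_self)
        (hprime v (List.mem_cons_of_mem _ hv))).mpr (by have := hpair.1 v hv; omega)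
    constructor
    · intro h
      refine ⟨(dvd_mul_right _ _).trans h, fun v hv => ?_⟩
      exact (List.dvd_prod (List.mem_map_of_mem hv)).trans ((dvd_mul_left _ _).trans h)
    · rintro ⟨h1, h2⟩
      exact Nat.Coprime.mul_dvd_of_dvd_of_dvd hcop h1
        ((ih hpair.2 (fun v hv => hprime v (List.mem_cons_of_mem _ hv))).mpr h2)

lemma prodPow_cast : ∀ (L : List (Int × Int)), (∀ pe ∈ L, 0 ≤ pe.1) →
    prodPow L = (((L.map (fun pe => pe.1.toNat ^ pe.2.toNat)).prod : Nat) : Int) := by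
  intro L
  induction L with
  | nil => intro _; rfl
  | cons pe rest ih =>
    intro h
    have h1 : pe.1 = ((pe.1.toNat : Nat) : Int) := by
      have := h pe List.mem_cons_self; omega
    have ih' := ih (fun x hx => h x (List.mem_cons_of_mem _ hx))
    rw [prodPow, List.map_cons, List.prod_cons, ← prodPow, ih', List.map_cons, List.prod_cons,
      Nat.cast_mul, Nat.cast_pow, ← h1]

-- distinct prime powers all divide F iff their product does
lemma prodPow_dvd_iff (F : Nat) (_hF : F ≠ 0) : ∀ (L : List (Int × Int)),
    L.Pairwise (fun u v => u.1 < v.1) →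
    (∀ pe ∈ L, Nat.Prime pe.1.toNat ∧ 2 ≤ pe.1 ∧ 1 ≤ pe.2) →
    (prodPow L ∣ (F : Int) ↔ ∀ pe ∈ L, pe.1 ^ pe.2.toNat ∣ (F : Int)) := by
  intro L hpair hmem
  have h0 : ∀ pe ∈ L, 0 ≤ pe.1 := fun pe hpe => by have := (hmem pe hpe).2.1; omega
  have hcast : ∀ pe ∈ L, pe.1 ^ pe.2.toNat = ((pe.1.toNat ^ pe.2.toNat : Nat) : Int) := by
    intro pe hpe
    have h1 : pe.1 = ((pe.1.toNat : Nat) : Int) := by have := h0 pe hpe; omega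
    rw [h1]; push_cast; rfl
  set M := L.map (fun pe => (pe.1.toNat, pe.2.toNat)) with hM
  have hMpair : M.Pairwise (fun u v => u.1 < v.1) := by
    rw [hM, List.pairwise_map]
    apply hpair.imp_of_mem
    intro u v hu hv huv
    have hu2 := (hmem u hu).2.1
    have hv2 := (hmem v hv).2.1
    simp only
    omega
  have hMprime : ∀ q ∈ M, q.1.Prime := by
    intro q hq
    obtain ⟨pe, hpe, rfl⟩ := List.mem_map.mp hq
    exact (hmem pe hpe).1
  have hnat := nat_pp_dvd F M hMpair hMprime
  have hprodeq : prodPow L = (((M.map (fun q => q.1 ^ q.2)).prod : Nat) : Int) := by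
    rw [prodPow_cast L h0]
    congr 1
    rw [hM, List.map_map]
    rfl
  constructor
  · intro h pe hpe
    rw [hcast pe hpe, Int.natCast_dvd_natCast]
    refine (hnat.mp ?_) (pe.1.toNat, pe.2.toNat) (List.mem_map_of_mem hpe)
    rw [← Int.natCast_dvd_natCast, ← hprodeq]
    exact h
  · intro h
    rw [hprodeq, Int.natCast_dvd_natCast]
    apply hnat.mpr
    intro q hq
    obtain ⟨pe, hpe, rfl⟩ := List.mem_map.mp hq
    rw [← Int.natCast_dvd_natCast, ← hcast pe hpe]
    exact h pe hpe

lemma ch_char (n a : Int) (ha : 2 ≤ a) :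
    ch n a = if a ∣ ((Nat.factorial n.toNat : Nat) : Int) then "YES" else "NO" := by
  unfold ch
  rw [if_neg (by omega), if_neg (by omega)]
  obtain ⟨L, hitems, hpair, hmem, hprod⟩ := pf_spec a ha
  rw [hitems, chLoop_eq]
  have hF : Nat.factorial n.toNat ≠ 0 := Nat.factorial_ne_zero _
  have hiff : (∀ pe ∈ L, pe.2 ≤ cf n pe.1) ↔ a ∣ ((Nat.factorial n.toNat : Nat) : Int) := by
    rw [← hprod, prodPow_dvd_iff _ hF L hpair hmem]
    apply forall₂_congr
    intro pe hpe
    obtain ⟨hp1, hp2, hp3⟩ := hmem pe hpe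
    rw [cf_eq pe.1 hp1 hp2]
    obtain ⟨P, hP⟩ : ∃ P : Nat, pe.1 = (P : Int) := ⟨pe.1.toNat, by omega⟩
    have hp1' : Nat.Prime P := by rwa [hP, Int.toNat_natCast] at hp1
    rw [hP, ← Nat.cast_pow, Int.natCast_dvd_natCast, Int.toNat_natCast,
      Nat.Prime.pow_dvd_iff_le_factorization hp1' hF]
    omega
  exact if_congr hiff rfl rfl

-- ---- B side: chAltLoop characterisation via the least-factorial thresholds ----

-- vF p m = multiplicity of p in m!
def vF (p m : Nat) : Nat := (Nat.factorial m).factorization p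

lemma vF_succ (p m : Nat) : vF p (m + 1) = vF p m + (m + 1).factorization p := by
  unfold vF
  rw [Nat.factorial_succ, Nat.factorization_mul (by omega) (Nat.factorial_ne_zero m)]
  simp [Finsupp.add_apply]
  omega

lemma vF_mono (p : Nat) {m m' : Nat} (h : m ≤ m') : vF p m ≤ vF p m' := by
  induction m' with
  | zero => simp_all
  | succ k ih =>
    rcases Nat.lt_or_ge m (k + 1) with hlt | hge
    · have := ih (by omega)
      rw [vF_succ]; omega
    · have : m = k + 1 := by omega
      simp [this]

lemma vF_gap (p : Nat) (m : Nat) (hm : p ∣ m) :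
    ∀ j, j < p → vF p (m + j) = vF p m := by
  intro j
  induction j with
  | zero => intro _; rfl
  | succ k ih =>
    intro hk
    have hnd : ¬ p ∣ (m + (k + 1)) := by
      intro hd
      have h1 : p ∣ (k + 1) := (Nat.dvd_add_right hm).mp hd
      have := Nat.le_of_dvd (by omega) h1
      omega
    rw [show m + (k + 1) = (m + k) + 1 by omega, vF_succ,
      Nat.factorization_eq_zero_of_not_dvd (by rwa [show m + k + 1 = m + (k + 1) by omega]),
      ih (by omega)]
    omega

lemma vF_jump (p : Nat) (hp : 2 ≤ p) (m : Nat) (hm : p ∣ m) :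
    vF p (m + p) = vF p m + (m + p).factorization p := by
  have h1 : m + p = (m + (p - 1)) + 1 := by omega
  rw [h1, vF_succ, vF_gap p m hm (p - 1) (by omega)]

lemma bCount_spec (p : Int) (hpp : Nat.Prime p.toNat) (hp : 2 ≤ p) :
    ∀ (X : Nat) (t : Int), t.toNat = X → 0 < t →
    ∀ (c : Int), bCount p t c = c + ((t.toNat.factorization p.toNat : Nat) : Int) := by
  intro X
  induction X using Nat.strong_induction_on with
  | _ X IH =>
    intro t hX ht c
    rw [bCount]
    by_cases hcond : 2 ≤ p ∧ 0 < t ∧ PySem.Int.mod t p = 0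
    · rw [dif_pos hcond]
      have hdvd : p ∣ t := (PySem.Int.mod_eq_zero_iff_dvd t p).mp hcond.2.2
      have hfd : PySem.Int.floordiv t p = t / p := PySem.Int.floordiv_eq_ediv_of_pos (by omega)
      have hti : p * (t / p) = t := Int.mul_ediv_cancel' hdvd
      have hq0 : 0 ≤ t / p := Int.ediv_nonneg (by omega) (by omega)
      have hqpos : 0 < t / p := by
        rcases eq_or_lt_of_le hq0 with h | h
        · exfalso; rw [← hti, ← h, mul_zero] at ht; exact lt_irrefl 0 ht
        · exact h
      have hlt : (t / p).toNat < X := by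
        have h2q : 2 * (t / p) ≤ p * (t / p) := mul_le_mul_of_nonneg_right (by omega) hq0
        omega
      have hnat : t.toNat = p.toNat * (t / p).toNat := by
        have h1 : ((p.toNat * (t / p).toNat : Nat) : Int) = p * (t / p) := by
          push_cast
          rw [Int.toNat_of_nonneg (by omega : (0 : Int) ≤ p), Int.toNat_of_nonneg hq0]
        omega
      rw [hfd, IH (t / p).toNat hlt (t / p) rfl hqpos (c + 1), hnat,
        Nat.factorization_mul (by omega) (by omega), Finsupp.add_apply,
        Nat.Prime.factorization_self hpp]
      push_cast
      ring
    · rw [dif_neg hcond]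
      have hndvd : ¬ p ∣ t := by
        intro h
        exact hcond ⟨hp, ht, (PySem.Int.mod_eq_zero_iff_dvd t p).mpr h⟩
      have : ¬ p.toNat ∣ t.toNat := by
        intro h
        apply hndvd
        have : ((p.toNat : Nat) : Int) ∣ ((t.toNat : Nat) : Int) := Int.natCast_dvd_natCast.mpr h
        rwa [show ((p.toNat : Nat) : Int) = p by omega, show ((t.toNat : Nat) : Int) = t by omega]
          at this
      rw [Nat.factorization_eq_zero_of_not_dvd this]
      simp

lemma reach_spec (p : Int) (hpp : Nat.Prime p.toNat) (h2 : 2 ≤ p) :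
    ∀ (fuel : Nat) (c x e : Int), (e - c).toNat = fuel → 0 ≤ x → p ∣ x →
    c = ((vF p.toNat x.toNat : Nat) : Int) →
    (∀ y : Nat, (y : Int) < x → ((vF p.toNat y : Nat) : Int) < e) →
    0 ≤ bReach p c x e ∧ e ≤ ((vF p.toNat (bReach p c x e).toNat : Nat) : Int) ∧
      (∀ y : Nat, (y : Int) < bReach p c x e → ((vF p.toNat y : Nat) : Int) < e) := by
  intro fuel
  induction fuel using Nat.strong_induction_on with
  | _ fuel IH =>
    intro c x e hfuel hx hdx hc hbelow
    rw [bReach]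
    by_cases hce : c < e
    · have hxp : (0 : Int) < x + p := by omega
      have hxpt : (x + p).toNat = x.toNat + p.toNat := by omega
      have hdn : p.toNat ∣ x.toNat := by
        obtain ⟨k, hk⟩ := hdx
        have hk0 : 0 ≤ k := by nlinarith
        refine ⟨k.toNat, ?_⟩
        have h1 : ((p.toNat * k.toNat : Nat) : Int) = p * k := by
          push_cast
          rw [Int.toNat_of_nonneg (by omega : (0 : Int) ≤ p), Int.toNat_of_nonneg hk0]
        omega
      have hcnt := bCount_spec p hpp h2 (x + p).toNat (x + p) rfl hxp c
      have hjump := vF_jump p.toNat (by omega) x.toNat hdn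
      have hc' : bCount p (x + p) c = ((vF p.toNat (x + p).toNat : Nat) : Int) := by
        rw [hcnt, hc, hxpt, hjump]
        push_cast
        ring
      have hpos : 0 < (x + p).toNat.factorization p.toNat := by
        apply Nat.Prime.factorization_pos_of_dvd hpp (by omega)
        rw [hxpt]
        exact Dvd.dvd.add hdn dvd_rfl
      have hgt : c + 1 ≤ bCount p (x + p) c := by
        rw [hcnt]; omega
      rw [dif_pos ⟨hce, h2, hx, hdx, by omega⟩]
      have hbelow' : ∀ y : Nat, (y : Int) < x + p → ((vF p.toNat y : Nat) : Int) < e := by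
        intro y hy
        by_cases hyx : (y : Int) < x
        · exact hbelow y hyx
        · have hyge : x.toNat ≤ y := by omega
          have hylt : y - x.toNat < p.toNat := by omega
          have := vF_gap p.toNat x.toNat hdn (y - x.toNat) hylt
          rw [show x.toNat + (y - x.toNat) = y by omega] at this
          rw [this, ← hc]
          exact hce
      exact IH (e - bCount p (x + p) c).toNat (by omega) (bCount p (x + p) c) (x + p) e rfl
        (by omega) (dvd_add hdx dvd_rfl) hc' hbelow'
    · rw [dif_neg (fun hh => hce hh.1)]
      exact ⟨hx, by omega, hbelow⟩

lemma reach_iff (p : Int) (hpp : Nat.Prime p.toNat) (h2 : 2 ≤ p) (e : Int) (he : 1 ≤ e)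
    (n : Int) : bReach p 0 0 e ≤ n ↔ e ≤ ((vF p.toNat n.toNat : Nat) : Int) := by
  obtain ⟨hr0, hrge, hrmin⟩ := reach_spec p hpp h2 (e - 0).toNat 0 0 e rfl le_rfl (dvd_zero p)
    (by simp [vF]) (by intro y hy; omega)
  constructor
  · intro hrn
    have hn0 : 0 ≤ n := le_trans hr0 hrn
    refine le_trans hrge ?_
    have := vF_mono p.toNat (show (bReach p 0 0 e).toNat ≤ n.toNat by omega)
    exact_mod_cast this
  · intro hev
    by_contra hlt
    push_neg at hlt
    by_cases hn : 0 ≤ n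
    · have := hrmin n.toNat (by omega)
      omega
    · have hnt : n.toNat = 0 := by omega
      rw [hnt] at hev
      simp [vF] at hev
      omega

lemma alt_fold (n : Int) : ∀ (K : Nat) (b d m : Int), K = (b + 1 - d).toNat → 2 ≤ d → 0 < b →
    (∀ q : Int, 2 ≤ q → q < d → ¬ q ∣ b) →
    chAltLoop n b d m =
      if m ≤ n ∧ b ∣ ((Nat.factorial n.toNat : Nat) : Int) then "YES" else "NO" := by
  have hF : Nat.factorial n.toNat ≠ 0 := Nat.factorial_ne_zero _
  intro K
  induction K using Nat.strong_induction_on with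
  | _ K IH =>
    intro b d m hK h2d hb hdiv
    rw [chAltLoop]
    by_cases hcond : 2 ≤ d ∧ d * d ≤ b
    · have hb4 : 4 ≤ b := by nlinarith [hcond.1, hcond.2]
      have hguard : 2 ≤ d ∧ d * d ≤ b ∧ d ≤ b ∧ (pyStrip d b 0).2 ≤ b := by
        refine ⟨hcond.1, hcond.2, by nlinarith [hcond.1, hcond.2], ?_⟩
        by_cases hm : PySem.Int.mod b d = 0
        · obtain ⟨mm, y, hst, hby, hy, -, -⟩ := pyStrip_spec d (by omega) b hb 0
          rw [hst]
          exact Int.le_of_dvd hb ⟨d ^ mm, by rw [hby]; ring⟩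
        · rw [pyStrip, dif_neg (fun hh => hm hh.2.2)]
      rw [dif_pos hguard]
      by_cases hmod : PySem.Int.mod b d = 0
      · -- d divides b; with no smaller divisor of b, d is prime
        have hdb : d ∣ b := (PySem.Int.mod_eq_zero_iff_dvd b d).mp hmod
        have hdcast : ((d.toNat : Nat) : Int) = d := by omega
        have hpd : Nat.Prime d.toNat := by
          rw [Nat.prime_def_lt]
          refine ⟨by omega, fun q hq hqd => ?_⟩
          by_contra hq1
          have hq0 : q ≠ 0 := by
            rintro rfl
            rw [Nat.zero_dvd] at hqd
            omega
          have hqj : (q : Int) ∣ d := by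
            rw [← hdcast]
            exact_mod_cast hqd
          exact hdiv q (by omega) (by omega) (hqj.trans hdb)
        obtain ⟨mm, y, hst, hby, hy, hdy, hm1⟩ := pyStrip_spec d (by omega) b hb 0
        have hm1' : 1 ≤ mm := hm1 hdb
        rw [if_pos hmod, hst]
        have hyb : y ∣ b := ⟨d ^ mm, by rw [hby]; ring⟩
        have hyle : y ≤ b := Int.le_of_dvd hb hyb
        -- Nat shadows
        have hbcast : ((b.toNat : Nat) : Int) = b := by omega
        have hycast : ((y.toNat : Nat) : Int) = y := by omega
        have hbnat : b.toNat = d.toNat ^ mm * y.toNat := by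
          have : ((b.toNat : Nat) : Int) = ((d.toNat ^ mm * y.toNat : Nat) : Int) := by
            push_cast
            rw [hbcast, hdcast, hycast, ← hby]
          exact_mod_cast this
        have hdyn : ¬ d.toNat ∣ y.toNat := by
          intro h
          apply hdy
          have : ((d.toNat : Nat) : Int) ∣ ((y.toNat : Nat) : Int) := Int.natCast_dvd_natCast.mpr h
          rwa [hdcast, hycast] at this
        have hcop : Nat.Coprime (d.toNat ^ mm) y.toNat :=
          Nat.Coprime.pow_left _ ((Nat.Prime.coprime_iff_not_dvd hpd).mpr hdyn)
        have hdvd_split : b ∣ ((Nat.factorial n.toNat : Nat) : Int) ↔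
            (d.toNat ^ mm ∣ Nat.factorial n.toNat ∧ y ∣ ((Nat.factorial n.toNat : Nat) : Int)) := by
          rw [show b = ((b.toNat : Nat) : Int) from hbcast.symm,
            show y = ((y.toNat : Nat) : Int) from hycast.symm,
            Int.natCast_dvd_natCast, Int.natCast_dvd_natCast, hbnat]
          constructor
          · intro h
            exact ⟨(dvd_mul_right _ _).trans h, (dvd_mul_left _ _).trans h⟩
          · rintro ⟨h1, h2⟩
            exact Nat.Coprime.mul_dvd_of_dvd_of_dvd hcop h1 h2
        have hreach : bReach d 0 0 (0 + (mm : Int)) ≤ n ↔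
            d.toNat ^ mm ∣ Nat.factorial n.toNat := by
          rw [reach_iff d hpd (by omega) (0 + (mm : Int)) (by push_cast; omega) n,
            Nat.Prime.pow_dvd_iff_le_factorization hpd hF]
          unfold vF
          push_cast
          omega
        have hdleb : d ≤ b := Int.le_of_dvd hb hdb
        rw [IH (y + 1 - (d + 1)).toNat (by omega) y (d + 1)
          (max m (bReach d 0 0 (0 + (mm : Int)))) rfl (by omega) hy
          (by
            intro q h2q hqd hqy
            rcases lt_or_eq_of_le (by omega : q + 1 ≤ d + 1) with h | h
            · exact hdiv q h2q (by omega) (hqy.trans hyb)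
            · have : q = d := by omega
              rw [this] at hqy
              exact hdy hqy)]
        have hiff : (max m (bReach d 0 0 (0 + (mm : Int))) ≤ n ∧
            y ∣ ((Nat.factorial n.toNat : Nat) : Int)) ↔
            (m ≤ n ∧ b ∣ ((Nat.factorial n.toNat : Nat) : Int)) := by
          rw [max_le_iff, hdvd_split]
          constructor
          · rintro ⟨⟨hmn, hrn⟩, hyF⟩
            exact ⟨hmn, hreach.mp hrn, hyF⟩
          · rintro ⟨hmn, hdm, hyF⟩
            exact ⟨⟨hmn, hreach.mpr hdm⟩, hyF⟩
        rw [if_congr hiff rfl rfl]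
      · rw [if_neg hmod]
        have hdb : ¬ d ∣ b := fun h => hmod ((PySem.Int.mod_eq_zero_iff_dvd b d).mpr h)
        have hdlt : d < b := by nlinarith [hcond.1, hcond.2]
        rw [IH (b + 1 - (d + 1)).toNat (by omega) b (d + 1) m rfl (by omega) hb
          (by
            intro q h2q hqd hqb
            rcases lt_or_eq_of_le (by omega : q + 1 ≤ d + 1) with h | h
            · exact hdiv q h2q (by omega) hqb
            · have : q = d := by omega
              rw [this] at hqb
              exact hdb hqb)]
    · rw [dif_neg (fun hh => hcond ⟨hh.1, hh.2.1⟩)]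
      have hdd : b < d * d := by
        by_contra h
        exact hcond ⟨h2d, by omega⟩
      by_cases hb1 : 1 < b
      · -- b is prime: any proper factor would be < d
        have hbcast : ((b.toNat : Nat) : Int) = b := by omega
        have hbprime : Nat.Prime b.toNat := by
          by_contra hnp
          have hq := Nat.minFac_prime (by omega : b.toNat ≠ 1)
          have hqd : Nat.minFac b.toNat ∣ b.toNat := Nat.minFac_dvd _
          have hq2 : Nat.minFac b.toNat ^ 2 ≤ b.toNat := Nat.minFac_sq_le_self (by omega) hnp
          have hqlt : ((Nat.minFac b.toNat : Nat) : Int) < d := by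
            nlinarith [hq.two_le, hq2, hdd, hbcast,
              (by exact_mod_cast Nat.le_refl 0 : (0 : Int) ≤ 0)]
          apply hdiv ((Nat.minFac b.toNat : Nat) : Int) (by exact_mod_cast hq.two_le) hqlt
          have : ((Nat.minFac b.toNat : Nat) : Int) ∣ ((b.toNat : Nat) : Int) :=
            Int.natCast_dvd_natCast.mpr hqd
          rwa [hbcast] at this
        have hdvd : b ∣ ((Nat.factorial n.toNat : Nat) : Int) ↔ b.toNat ≤ n.toNat := by
          rw [show b = ((b.toNat : Nat) : Int) from hbcast.symm, Int.natCast_dvd_natCast]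
          exact Nat.Prime.dvd_factorial hbprime
        rw [if_pos hb1]
        have hiff : max m b ≤ n ↔
            (m ≤ n ∧ b ∣ ((Nat.factorial n.toNat : Nat) : Int)) := by
          rw [max_le_iff, hdvd]
          constructor
          · rintro ⟨h1, h2⟩
            exact ⟨h1, by omega⟩
          · rintro ⟨h1, h2⟩
            exact ⟨h1, by omega⟩
        rw [if_congr hiff rfl rfl]
      · have hbeq : b = 1 := by omega
        rw [if_neg hb1]
        have hiff : m ≤ n ↔ (m ≤ n ∧ b ∣ ((Nat.factorial n.toNat : Nat) : Int)) := by
          rw [hbeq]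
          exact ⟨fun h => ⟨h, one_dvd _⟩, And.left⟩
        rw [if_congr hiff rfl rfl]

lemma ch_alt_char (n a : Int) (ha : 2 ≤ a) :
    ch_alt n a = if a ∣ ((Nat.factorial n.toNat : Nat) : Int) then "YES" else "NO" := by
  unfold ch_alt
  rw [if_neg (by omega), if_neg (by omega),
    alt_fold n (a + 1 - 2).toNat a 2 0 rfl (by omega) (by omega)
      (fun q h2q hq2 => absurd h2q (by omega))]
  have hiff : (0 ≤ n ∧ a ∣ ((Nat.factorial n.toNat : Nat) : Int)) ↔
      a ∣ ((Nat.factorial n.toNat : Nat) : Int) := by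
    constructor
    · exact fun h => h.2
    · intro h
      refine ⟨?_, h⟩
      by_contra hn
      have hnt : n.toNat = 0 := by omega
      rw [hnt] at h
      have := Int.le_of_dvd (by norm_num) h
      norm_num [Nat.factorial] at this
      omega
  rw [if_congr hiff rfl rfl]

-- ===== VERDICT (by name: the statement is the Claim_ definition above) =====
theorem ch_spec : Claim_equal_ch := by
  intro n a _ hpre
  unfold Spec_ch
  by_cases h0 : a = 0
  · simp [ch, ch_alt, h0]
  · by_cases h1 : a = 1
    · simp [ch, ch_alt, h1]
    · have ha : 2 ≤ a := by unfold Pre_ch at hpre; omega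
      rw [ch_char n a ha, ch_alt_char n a ha]
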